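-- pv_equiv track=rewrite | github.com/jiportilla/ontology | python/taskadmin/core/svc/clean_synonyms.py | _sort_and_merge
-- ===== SOURCE A (Python) =====
-- def _sort_and_merge(lines: list) -> dict:
--     """
--     :param lines:
--         the current lines the synonyms_kb.csv file
--     :return:
--         a dictionary that sorts and merges all these lines into a single dictionary
--
--         for exmaple
--             alpha~beta
--             alpha~gamma
--         becomes
--             { alpha: [beta, gamma] }
--     """
--     d = {}
--     for line in lines:
--         key = line[0].lower().strip()
--
--         key = key.replace(" ", "_")
--
--         if len(line) != 2:
--             raise ValueError("\n".join([
--                 "Unrecognized Line Length",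
--                 "\texpected: 2",
--                 "\tactual: {}".format(len(line)),
--                 "\t{}".format(line)]))
--
--         if not len(key):
--             raise ValueError("\n".join([
--                 "No Canonical Form Found",
--                 "\tline: {}".format(line)]))
--
--         values = sorted(set([x.lower().strip() for x in line[1].split(",") if x]))
--         values = [x for x in values if x != key]
--         values = [x for x in values if type(x) == str]
--
--         if key.endswith("_skill"):
--             values.append("expert {}".format(key[:len(key) - 6]))
--             values.append(key.replace("_skill", " background"))
--             values.append(key.replace("_skill", " experience"))
--
--         if key in d:
--             d[key] = set(set(d[key]).union(set(values)))
--         else: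
--             d[key] = values
--
--     for k in d:
--         d[k] = sorted(set(d[k]))
--
--     return d
-- ===== SOURCE B (Python) =====
-- def _sort_and_merge(lines: list) -> dict:
--     # Different decomposition: flatten everything into one flat list of
--     # (key, value) pairs (values key-filtered, skill synonyms added as pairs),
--     # then sort the de-duplicated pairs once globally and distribute them into
--     # per-key lists — each key's list comes out sorted and unique for free.
--     pairs = []
--     order = []
--     for line in lines:
--         first = line[0]
--         if len(line) != 2:
--             raise ValueError("\n".join([
--                 "Unrecognized Line Length",
--                 "\texpected: 2",
--                 "\tactual: {}".format(len(line)),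
--                 "\t{}".format(line)]))
--         key = first.lower().strip().replace(" ", "_")
--         if not key:
--             raise ValueError("\n".join([
--                 "No Canonical Form Found",
--                 "\tline: {}".format(line)]))
--         order.append(key)
--         for x in line[1].split(","):
--             if x:
--                 v = x.lower().strip()
--                 if v != key:
--                     pairs.append((key, v))
--         if key.endswith("_skill"):
--             pairs.append((key, "expert " + key[:-6]))
--             pairs.append((key, key.replace("_skill", " background")))
--             pairs.append((key, key.replace("_skill", " experience")))
--     result = {k: [] for k in dict.fromkeys(order)}
--     for k, v in sorted(set(pairs)):
--         result[k].append(v)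
--     return result
-- ===== Notes on version B (the rewrite author's own statement) =====
-- stated objective: alternative
-- what changed: B replaces A's dict-accumulation (per-line sort+dedup+filter+skill-append, set-union merging on key collisions, final per-key re-sort) by a flatten/sort/distribute scheme: it flattens all lines into one flat list of (key,value) pairs (skill synonyms included as pairs), sorts the de-duplicated pair list once globally, and distributes the pairs into per-key lists, which are then sorted and unique for free.
import Mathlib
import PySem

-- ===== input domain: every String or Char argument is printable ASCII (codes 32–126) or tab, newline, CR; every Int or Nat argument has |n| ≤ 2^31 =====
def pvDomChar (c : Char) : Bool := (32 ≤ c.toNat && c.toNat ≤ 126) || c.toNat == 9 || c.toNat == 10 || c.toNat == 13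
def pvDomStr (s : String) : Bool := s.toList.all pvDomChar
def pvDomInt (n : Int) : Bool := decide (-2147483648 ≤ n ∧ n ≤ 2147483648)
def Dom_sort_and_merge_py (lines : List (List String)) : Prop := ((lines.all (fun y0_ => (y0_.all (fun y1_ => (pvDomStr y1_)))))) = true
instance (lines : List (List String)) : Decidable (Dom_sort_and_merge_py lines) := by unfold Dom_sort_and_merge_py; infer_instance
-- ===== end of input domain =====

-- B flattens the input into one flat list of (key, value) pairs (skill synonyms
-- included as pairs), sorts the de-duplicated pair list once globally and
-- distributes the pairs into per-key lists, instead of A's dict accumulation with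
-- per-line sort/filter/append and set-union merging. Objective: alternative.
-- Both Pythons only build local state; the equivalence is about the returned dict.

-- ===== PORT A =====
-- key = line[0].lower().strip().replace(" ", "_")
def pvKeyA (s : String) : String := PySem.Str.replace (PySem.Str.strip (PySem.Str.lower s)) " " "_"
-- [x.lower().strip() for x in v.split(",") if x]   (the separator "," is nonempty, so split? is always some)
def pvValsA (v : String) : List String :=
  (((PySem.Str.split? v ",").getD []).filter (fun x => x ≠ "")).map (fun x => PySem.Str.strip (PySem.Str.lower x))
-- "expert {}".format(key[:len(key) - 6]) — str concatenation ported exactly on code points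
def pvExpertA (key : String) : String :=
  String.ofList ("expert ".toList ++ (PySem.Str.slice key none (some (PySem.Str.len key - 6))).toList)
-- A's per-line `values` after the sort/dedup, the `!= key` filter (the following
-- `type(x) == str` filter is identically true on strings) and the three skill appends
def pvContribA (key : String) (line : List String) : List String :=
  let values := PySem.List.sorted (PySem.Set.ofList (pvValsA (line.getD 1 ""))) (fun x => x)
  let values := values.filter (fun x => x ≠ key)
  if PySem.Str.endswith key "_skill" then
    values ++ [pvExpertA key,
               PySem.Str.replace key "_skill" " background",
               PySem.Str.replace key "_skill" " experience"]
  else values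
-- d[key] = set(set(d[key]).union(set(values))) if key in d else values; the set is consumed
-- only through sorted(set(..)) in the second loop, so PySem.Set.union is an exact stand-in
def pvMergeA (d : PySem.Dict String (List String)) (line : List String) : List String :=
  if d.contains (pvKeyA (line.headD ""))
    then PySem.Set.union (PySem.Set.ofList (d.getD (pvKeyA (line.headD "")) [])) (pvContribA (pvKeyA (line.headD "")) line)
    else pvContribA (pvKeyA (line.headD "")) line
-- body of A's first loop; the two ValueError guards and line[0]'s IndexError only raise,
-- and Pre_ excludes exactly those inputs
def pvStepA (d : PySem.Dict String (List String)) (line : List String) : PySem.Dict String (List String) :=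
  d.insert (pvKeyA (line.headD "")) (pvMergeA d line)
def sort_and_merge_py (lines : List (List String)) : List (String × List String) :=
  -- for k in d: d[k] = sorted(set(d[k]))
  (lines.foldl pvStepA PySem.Dict.empty).items.map
    (fun p => (p.1, PySem.List.sorted (PySem.Set.ofList p.2) (fun x => x)))

-- ===== PORT B =====
def pvKeyB (s : String) : String := PySem.Str.replace (PySem.Str.strip (PySem.Str.lower s)) " " "_"
-- v = x.lower().strip() for the non-empty x in line[1].split(",")
def pvValsB (v : String) : List String :=
  (((PySem.Str.split? v ",").getD []).filter (fun x => x ≠ "")).map (fun x => PySem.Str.strip (PySem.Str.lower x))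
-- the (key, value) pairs one line appends: the key-filtered normalised values,
-- then the three skill-synonym pairs ("expert " + key[:-6] ported exactly on code points)
def pvLinePairs (line : List String) : List (String × String) :=
  if PySem.Str.endswith (pvKeyB (line.headD "")) "_skill" then
    ((pvValsB (line.getD 1 "")).filter (fun v => v ≠ pvKeyB (line.headD ""))).map
        (fun v => (pvKeyB (line.headD ""), v)) ++
      [(pvKeyB (line.headD ""), String.ofList ("expert ".toList ++ (PySem.Str.slice (pvKeyB (line.headD "")) none (some (-6))).toList)),
       (pvKeyB (line.headD ""), PySem.Str.replace (pvKeyB (line.headD "")) "_skill" " background"),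
       (pvKeyB (line.headD ""), PySem.Str.replace (pvKeyB (line.headD "")) "_skill" " experience")]
  else
    ((pvValsB (line.getD 1 "")).filter (fun v => v ≠ pvKeyB (line.headD ""))).map
      (fun v => (pvKeyB (line.headD ""), v))
-- pass 1: one loop growing the two accumulators `pairs` and `order`
-- (B's raises on a malformed line are excluded by Pre_, exactly as in A)
def pvPass1 (lines : List (List String)) : List (String × String) × List String :=
  lines.foldl (fun acc line => (acc.1 ++ pvLinePairs line, acc.2 ++ [pvKeyB (line.headD "")])) ([], [])
def sort_and_merge_py_alt (lines : List (List String)) : List (String × List String) :=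
  let pr := pvPass1 lines
  -- result = {k: [] for k in dict.fromkeys(order)}
  let result0 := (PySem.List.dedup pr.2).foldl (fun d k => d.insert k ([] : List String)) PySem.Dict.empty
  -- for k, v in sorted(set(pairs)): result[k].append(v)
  -- (modify's default [] is never used: every pair key was seeded into result0, as Python's result[k] requires)
  ((PySem.List.sorted2 (PySem.Set.ofList pr.1) (fun p => p.1) (fun p => p.2)).foldl
      (fun d p => d.modify p.1 [] (fun l => l ++ [p.2])) result0).items

-- ===== PRECONDITION & SPEC =====
-- Pre_ excludes exactly the inputs on which the Python raises: a line whose length is not 2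
-- (ValueError, or IndexError on an empty line) or whose normalised key is empty (ValueError).
def Pre_sort_and_merge_py (lines : List (List String)) : Prop :=
  ∀ line ∈ lines, line.length = 2 ∧
    PySem.Str.replace (PySem.Str.strip (PySem.Str.lower (line.headD ""))) " " "_" ≠ ""
instance (lines : List (List String)) : Decidable (Pre_sort_and_merge_py lines) := by
  unfold Pre_sort_and_merge_py; infer_instance
def pvWitness_sort_and_merge_py : List (List String) :=
  [["Python Skill", "Py, python"], ["alpha", "beta"], ["Alpha", "gamma,beta"]]
def Spec_sort_and_merge_py (lines : List (List String)) (out : List (String × List String)) : Prop := out = sort_and_merge_py_alt lines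
instance (lines : List (List String)) (out : List (String × List String)) : Decidable (Spec_sort_and_merge_py lines out) := by unfold Spec_sort_and_merge_py; infer_instance

-- ===== CLAIM (what is proved, stated in full; the proofs are below) =====
def Claim_equal_sort_and_merge_py : Prop := ∀ (lines : List (List String)), Dom_sort_and_merge_py lines → Pre_sort_and_merge_py lines → Spec_sort_and_merge_py lines (sort_and_merge_py lines)

-- ===== LEMMAS AND PROOFS =====

theorem pvKeyB_eq : pvKeyB = pvKeyA := rfl
theorem pvValsB_eq : pvValsB = pvValsA := rfl

-- under a "_skill" key, B's key[:-6] is A's key[:len(key) - 6]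
theorem pvExpert_eq (key : String) (h : PySem.Str.endswith key "_skill" = true) :
    String.ofList ("expert ".toList ++ (PySem.Str.slice key none (some (-6))).toList) = pvExpertA key := by
  have hsuf : ("_skill".toList) <:+ key.toList := by
    rw [PySem.Str.endswith_eq] at h
    exact (PySem.Chars.endswith_iff _ _).mp h
  have hlen : 6 ≤ key.toList.length := by
    have := hsuf.length_le
    simpa using this
  unfold pvExpertA
  refine congrArg (fun l => String.ofList ("expert ".toList ++ l)) ?_
  rw [PySem.Str.toList_slice, PySem.Str.toList_slice, PySem.Chars.slice_eq_listSlice,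
      PySem.Chars.slice_eq_listSlice]
  rw [PySem.List.slice_to_neg_ofNat key.toList 6 (by norm_num)]
  rw [PySem.List.slice_to _ (by rw [PySem.Str.len_eq]; omega)]
  rw [PySem.Str.len_eq]
  congr 1
  omega

theorem pvMemContribA (key : String) (line : List String) (x : String) :
    x ∈ pvContribA key line ↔ ((x ∈ pvValsA (line.getD 1 "") ∧ x ≠ key) ∨
      (PySem.Str.endswith key "_skill" = true ∧
        (x = pvExpertA key ∨ x = PySem.Str.replace key "_skill" " background" ∨
         x = PySem.Str.replace key "_skill" " experience"))) := by
  unfold pvContribA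
  by_cases h : PySem.Str.endswith key "_skill" = true
  · simp only [h, if_true, List.mem_append, List.mem_filter, PySem.List.mem_sorted,
      PySem.Set.mem_ofList, List.mem_cons, List.not_mem_nil, or_false, decide_eq_true_eq,
      true_and]
  · simp only [Bool.not_eq_true] at h
    simp only [h, Bool.false_eq_true, if_false, List.mem_filter, PySem.List.mem_sorted,
      PySem.Set.mem_ofList, decide_eq_true_eq, false_and, or_false]

-- membership of the two per-line pair shapes, over abstract strings
theorem pvPairsShapeSkill (K E B X k x : String) (A : List String) :
    ((k, x) ∈ (A.filter (fun v => v ≠ K)).map (fun v => (K, v)) ++ [(K, E), (K, B), (K, X)]) ↔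
      (k = K ∧ ((x ∈ A ∧ x ≠ K) ∨ (x = E ∨ x = B ∨ x = X))) := by
  simp only [List.mem_append, List.mem_map, List.mem_filter, List.mem_cons, List.not_mem_nil,
    or_false, Prod.mk.injEq, decide_eq_true_eq]
  constructor
  · rintro (⟨v, ⟨hv, hvk⟩, hK, hx⟩ | (⟨hK, hx⟩ | ⟨hK, hx⟩ | ⟨hK, hx⟩)) <;> subst hK <;>
      subst hx <;> tauto
  · rintro ⟨hk, (⟨hv, hvk⟩ | (hx | hx | hx))⟩ <;> subst hk <;> try subst hx
    · exact Or.inl ⟨x, ⟨hv, hvk⟩, rfl, rfl⟩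
    · tauto
    · tauto
    · tauto

theorem pvPairsShapePlain (K k x : String) (A : List String) :
    ((k, x) ∈ (A.filter (fun v => v ≠ K)).map (fun v => (K, v))) ↔
      (k = K ∧ (x ∈ A ∧ x ≠ K)) := by
  simp only [List.mem_map, List.mem_filter, Prod.mk.injEq, decide_eq_true_eq]
  constructor
  · rintro ⟨v, ⟨hv, hvk⟩, hK, hx⟩; subst hK; subst hx; exact ⟨rfl, hv, hvk⟩
  · rintro ⟨hk, hv, hvk⟩; subst hk; exact ⟨x, ⟨hv, hvk⟩, rfl, rfl⟩

theorem pvMemLinePairs (line : List String) (k x : String) :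
    (k, x) ∈ pvLinePairs line ↔
      (k = pvKeyA (line.headD "") ∧ x ∈ pvContribA (pvKeyA (line.headD "")) line) := by
  rw [pvMemContribA]
  unfold pvLinePairs
  rw [pvKeyB_eq, pvValsB_eq]
  by_cases h : PySem.Str.endswith (pvKeyA (line.headD "")) "_skill" = true
  · rw [if_pos h, pvExpert_eq _ h]
    simp only [h, true_and]
    exact pvPairsShapeSkill _ _ _ _ _ _ _
  · rw [if_neg h]
    simp only [Bool.not_eq_true] at h
    simp only [h, Bool.false_eq_true, false_and, or_false]
    exact pvPairsShapePlain _ _ _ _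

theorem pvLinePairs_fst (line : List String) (p : String × String)
    (h : p ∈ pvLinePairs line) : p.1 = pvKeyA (line.headD "") := by
  obtain ⟨k, x⟩ := p
  exact ((pvMemLinePairs line k x).mp h).1

-- pass 1 computed in closed form
theorem pvPass1_eq (lines : List (List String)) :
    pvPass1 lines = (lines.flatMap pvLinePairs, lines.map (fun l => pvKeyA (l.headD ""))) := by
  unfold pvPass1
  rw [PySem.List.foldl_prod_mk (f := fun acc line => acc ++ pvLinePairs line)
      (g := fun acc line => acc ++ [pvKeyB (line.headD "")])]
  rw [PySem.List.foldl_append_eq_flatMap, PySem.List.foldl_append_singleton_eq_map]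
  rw [pvKeyB_eq]
  simp

-- invariant of A's loop: key presence mirrors seen keys, value membership mirrors produced pairs
def pvInvA (dA : PySem.Dict String (List String)) (P : List (String × String)) (K : List String) : Prop :=
  (∀ k, dA.contains k = decide (k ∈ K)) ∧
  (∀ p ∈ P, p.1 ∈ K) ∧
  (∀ k x, x ∈ dA.getD k [] ↔ (k, x) ∈ P)

theorem pvInvA_step (dA : PySem.Dict String (List String)) (P : List (String × String))
    (Ks : List String) (line : List String) (h : pvInvA dA P Ks) :
    pvInvA (pvStepA dA line) (P ++ pvLinePairs line) (Ks ++ [pvKeyA (line.headD "")]) := by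
  obtain ⟨h1, h2, h3⟩ := h
  refine ⟨?_, ?_, ?_⟩
  · intro k
    rw [pvStepA, PySem.Dict.contains_insert, h1 k]
    by_cases hk : k = pvKeyA (line.headD "") <;> by_cases hm : k ∈ Ks <;> simp [hk, hm, Bool.beq_eq_decide_eq]
  · intro p hp
    rcases List.mem_append.mp hp with hp | hp
    · exact List.mem_append.mpr (Or.inl (h2 p hp))
    · rw [pvLinePairs_fst line p hp]; simp
  · intro k x
    rw [pvStepA, PySem.Dict.getD_insert, List.mem_append, pvMemLinePairs]
    set K := pvKeyA (line.headD "")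
    by_cases hk : k = K
    · subst hk
      rw [if_pos rfl]
      unfold pvMergeA
      by_cases hc : dA.contains K = true
      · rw [if_pos hc, PySem.Set.mem_union, PySem.Set.mem_ofList, h3,
          and_iff_right (rfl : K = K)]
      · have hcf : dA.contains K = false := Bool.not_eq_true _ ▸ eq_false_of_ne_true hc
        rw [if_neg hc]
        have hnk : K ∉ Ks := by
          have := h1 K
          rw [hcf] at this
          intro hmem
          rw [decide_eq_true hmem] at this
          exact Bool.false_ne_true this
        have hnp : ¬ ((K, x) ∈ P) := by intro hmem; exact hnk (h2 (K, x) hmem)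
        rw [and_iff_right (rfl : K = K)]
        exact ⟨fun hx => Or.inr hx, fun h => h.elim (fun hp => absurd hp hnp) id⟩
    · rw [if_neg hk, h3]
      exact ⟨Or.inl, fun h => h.elim id (fun hx => absurd hx.1 hk)⟩

theorem pvInvA_fold (lines : List (List String)) (dA : PySem.Dict String (List String))
    (P : List (String × String)) (K : List String) (h : pvInvA dA P K) :
    pvInvA (lines.foldl pvStepA dA) (P ++ lines.flatMap pvLinePairs)
      (K ++ lines.map (fun l => pvKeyA (l.headD ""))) := by
  induction lines generalizing dA P K with
  | nil => simpa using h
  | cons l t ih =>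
    have := ih (pvStepA dA l) (P ++ pvLinePairs l) (K ++ [pvKeyA (l.headD "")])
      (pvInvA_step dA P K l h)
    simpa [List.append_assoc] using this

theorem pvInvA_main (lines : List (List String)) :
    pvInvA (lines.foldl pvStepA PySem.Dict.empty) (lines.flatMap pvLinePairs)
      (lines.map (fun l => pvKeyA (l.headD ""))) := by
  have h0 : pvInvA PySem.Dict.empty [] [] := by
    refine ⟨?_, ?_, ?_⟩
    · intro k; simp [PySem.Dict.contains_empty]
    · intro p hp; simp at hp
    · intro k x; simp [PySem.Dict.getD_empty]
  simpa using pvInvA_fold lines PySem.Dict.empty [] [] h0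

theorem pvKeysA (lines : List (List String)) :
    (lines.foldl pvStepA PySem.Dict.empty).keys
      = PySem.Set.ofList (lines.map (fun l => pvKeyA (l.headD ""))) := by
  have h := PySem.Dict.keys_foldl_insert_key (ν := List String) lines
    (fun l => pvKeyA (l.headD "")) pvMergeA PySem.Dict.empty
  rw [PySem.Dict.keys_empty, PySem.Set.update_nil_left] at h
  exact h

theorem pvNodupKeysA (lines : List (List String)) :
    (lines.foldl pvStepA PySem.Dict.empty).keys.Nodup :=
  PySem.Dict.nodup_keys_foldl_insert_key lines (fun l => pvKeyA (l.headD "")) pvMergeA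
    PySem.Dict.empty (by rw [PySem.Dict.keys_empty]; exact List.nodup_nil)

-- sorted(pairs) on tuples IS sorting by the lexicographic key
theorem pvSorted2_eq (xs : List (String × String)) :
    PySem.List.sorted2 xs (fun p => p.1) (fun p => p.2)
      = PySem.List.sorted xs (fun p => toLex p) := by
  have hb : (fun (a b : String × String) =>
        decide (a.1 < b.1) || (!decide (b.1 < a.1) && decide (a.2 < b.2)))
      = (fun (a b : String × String) => decide (toLex a < toLex b)) := by
    funext a b
    rw [Bool.eq_iff_iff]
    simp only [Bool.or_eq_true, Bool.and_eq_true, Bool.not_eq_true',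
      decide_eq_true_eq, decide_eq_false_iff_not, Prod.Lex.toLex_lt_toLex]
    constructor
    · rintro (h | ⟨hn, h2⟩)
      · exact Or.inl h
      · rcases eq_or_lt_of_le (not_lt.mp hn) with he | hl
        · exact Or.inr ⟨he, h2⟩
        · exact Or.inl hl
    · rintro (h | ⟨he, h2⟩)
      · exact Or.inl h
      · exact Or.inr ⟨by rw [he]; exact lt_irrefl _, h2⟩
  simp only [PySem.List.sorted2, PySem.List.sorted, Bool.false_eq_true, if_false, hb]

-- the dict seeded with [] at every key reads [] everywhere
theorem pvInit_getD (l : List String) (d : PySem.Dict String (List String))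
    (h : ∀ k, d.getD k [] = []) (k : String) :
    (l.foldl (fun d k => d.insert k ([] : List String)) d).getD k [] = [] := by
  induction l generalizing d with
  | nil => exact h k
  | cons a t ih =>
    refine ih _ ?_
    intro k'
    rw [PySem.Dict.getD_insert]
    by_cases hk : k' = a <;> simp [hk, h k']

theorem sort_and_merge_py_agree (lines : List (List String)) :
    sort_and_merge_py lines = sort_and_merge_py_alt lines := by
  obtain ⟨-, hF, hM⟩ := pvInvA_main lines
  unfold sort_and_merge_py sort_and_merge_py_alt
  rw [pvPass1_eq]
  set pairs := lines.flatMap pvLinePairs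
  set order := lines.map (fun l => pvKeyA (l.headD "")) with horder
  set S := PySem.List.sorted2 (PySem.Set.ofList pairs) (fun p => p.1) (fun p => p.2) with hS
  -- keys of the seeded result dict
  have hkeys0 : ((PySem.List.dedup order).foldl
      (fun d k => d.insert k ([] : List String)) PySem.Dict.empty).keys
      = PySem.Set.ofList order := by
    have h := PySem.Dict.keys_foldl_insert (ν := List String) (PySem.List.dedup order)
      (fun _ _ => ([] : List String)) PySem.Dict.empty
    rw [PySem.Dict.keys_empty, PySem.Set.update_nil_left, PySem.List.dedup_eq_ofList,
      PySem.Set.ofList_ofList] at h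
    exact h
  -- keys of B's final dict
  have hSP : ∀ p ∈ S, p ∈ pairs := by
    intro p hp
    have := (PySem.List.sorted2_perm (PySem.Set.ofList pairs)
      (fun p => p.1) (fun p => p.2) false).mem_iff.mp (hS ▸ hp)
    exact (PySem.Set.mem_ofList _ _).mp this
  have hkeysB : ((S.foldl (fun d p => d.modify p.1 [] (fun l => l ++ [p.2]))
      ((PySem.List.dedup order).foldl (fun d k => d.insert k ([] : List String))
        PySem.Dict.empty))).keys = PySem.Set.ofList order := by
    have h := PySem.Dict.keys_foldl_modify_key (ν := List String) S (fun p => p.1) []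
      (fun _ p => fun l => l ++ [p.2])
      ((PySem.List.dedup order).foldl (fun d k => d.insert k ([] : List String)) PySem.Dict.empty)
    rw [hkeys0] at h
    rw [h, PySem.Set.update_eq_append_filter]
    have : List.filter (fun y => !(PySem.Set.ofList order).contains y)
        (PySem.Set.ofList (S.map (fun p => p.1))) = [] := by
      rw [List.filter_eq_nil_iff]
      intro k hk
      have hk' : k ∈ S.map (fun p => p.1) := (PySem.Set.mem_ofList _ _).mp hk
      obtain ⟨p, hp, hpk⟩ := List.mem_map.mp hk'
      have hko : k ∈ order := hpk ▸ hF p (hSP p hp)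
      simp [PySem.Set.mem_ofList, hko]
    rw [this, List.append_nil]
  -- B's per-key value
  have hvalB : ∀ k, ((S.foldl (fun d p => d.modify p.1 [] (fun l => l ++ [p.2]))
      ((PySem.List.dedup order).foldl (fun d k => d.insert k ([] : List String))
        PySem.Dict.empty))).getD k []
      = (S.filter (fun p => p.1 == k)).map (fun p => p.2) := by
    intro k
    rw [PySem.Dict.getD_foldl_modify_append]
    rw [pvInit_getD _ _ (fun k' => by simp [PySem.Dict.getD_empty]) k]
    rfl
  -- sortedness machinery on S
  have hSperm : S.Perm (PySem.Set.ofList pairs) :=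
    hS ▸ PySem.List.sorted2_perm (PySem.Set.ofList pairs) (fun p => p.1) (fun p => p.2) false
  have hSnd : S.Nodup := hSperm.nodup_iff.mpr (PySem.Set.nodup_ofList pairs)
  have hSle : S.Pairwise (fun a b => (toLex a : Lex (String × String)) ≤ toLex b) := by
    rw [hS, pvSorted2_eq]
    exact PySem.List.sorted_pairwise (PySem.Set.ofList pairs) (fun p => toLex p)
  -- nodup of the two dicts' keys
  have hndB : ((S.foldl (fun d p => d.modify p.1 [] (fun l => l ++ [p.2]))
      ((PySem.List.dedup order).foldl (fun d k => d.insert k ([] : List String))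
        PySem.Dict.empty))).keys.Nodup := by
    refine PySem.Dict.nodup_keys_foldl_modify_key S (fun p => p.1) []
      (fun _ p => fun l => l ++ [p.2]) _ ?_
    rw [hkeys0]
    exact PySem.Set.nodup_ofList order
  rw [PySem.Dict.items_eq_map_keys _ (pvNodupKeysA lines) [],
      PySem.Dict.items_eq_map_keys _ hndB [], List.map_map, pvKeysA, hkeysB, ← horder]
  apply List.map_congr_left
  intro k _
  simp only [Function.comp]
  refine congrArg (Prod.mk k) ?_
  rw [hvalB k]
  -- Gk is strictly increasing
  have hGlt : (((S.filter (fun p => p.1 == k)).map (fun p => p.2)).Pairwise (· < ·)) := by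
    rw [List.pairwise_map, List.pairwise_filter]
    refine (hSle.and hSnd).imp ?_
    rintro a b ⟨hle, hne⟩ hak hbk
    have hak' : a.1 = k := by simpa using hak
    have hbk' : b.1 = k := by simpa using hbk
    have hlt : (toLex a : Lex (String × String)) < toLex b := by
      refine lt_of_le_of_ne hle ?_
      intro hEq
      exact hne (by simpa using hEq)
    rcases Prod.Lex.toLex_lt_toLex.mp hlt with h | ⟨_, h⟩
    · rw [hak', hbk'] at h; exact absurd h (lt_irrefl k)
    · exact h
  have hGnd : (((S.filter (fun p => p.1 == k)).map (fun p => p.2)).Nodup) :=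
    hGlt.imp (fun h => ne_of_lt h)
  -- same members as A's value set
  refine PySem.List.sorted_eq_of_perm_of_pairwise_lt _ _ (fun x => x) ?_ hGlt
  rw [List.perm_ext_iff_of_nodup hGnd (PySem.Set.nodup_ofList _)]
  intro v
  rw [PySem.Set.mem_ofList, hM k v]
  constructor
  · intro hv
    obtain ⟨p, hp, hpv⟩ := List.mem_map.mp hv
    have hpf := List.mem_filter.mp hp
    have hk : p.1 = k := by simpa using hpf.2
    have : p = (k, v) := by
      obtain ⟨p1, p2⟩ := p
      simp only at hk hpv
      rw [hk, hpv]
    rw [this] at hpf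
    exact hSP _ hpf.1
  · intro hv
    refine List.mem_map.mpr ⟨(k, v), List.mem_filter.mpr ⟨?_, by simp⟩, rfl⟩
    exact hSperm.mem_iff.mpr ((PySem.Set.mem_ofList _ _).mpr hv)

-- ===== VERDICT (by name: the statement is the Claim_ definition above) =====
theorem sort_and_merge_py_spec : Claim_equal_sort_and_merge_py := by
  intro lines _ _
  unfold Spec_sort_and_merge_py
  exact sort_and_merge_py_agree lines
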